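-- pv_equiv track=rewrite | github.com/ProgrammerApasionated/ProyectosPersonalesPython | ProyectosAdicionales/gestor-temperaturas/src/temperaturas.py | racha_de_ola_de_frio
-- ===== SOURCE A (Python) =====
-- def racha_de_ola_de_frio(lista_temperaturas):
--     inicio = -1
--     longitud = 0
--     mayor_inicio = -1
--     mayor_longitud = 0
--     mayor_final = -1
--     i = 0
--     while i < len(lista_temperaturas):
--         if lista_temperaturas[i] < 0:
--             if longitud == 0:
--                 inicio = i
--             longitud += 1
--         else:
--             if longitud > mayor_longitud:
--                 mayor_longitud = longitud
--                 mayor_inicio = inicio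
--                 mayor_final = i - 1
--             longitud = 0
--         i += 1
--     if longitud > mayor_longitud:
--         mayor_longitud = longitud
--         mayor_inicio = inicio
--         mayor_final = i - 1
--     if mayor_longitud == 0:
--         return 0, None, None
--     return mayor_longitud, mayor_inicio, mayor_final
-- ===== SOURCE B (Python) =====
-- def racha_de_ola_de_frio(lista_temperaturas):
--     # Phase 1: collect every maximal run of negatives as (length, start, end).
--     runs = []
--     i = 0
--     n = len(lista_temperaturas)
--     while i < n:
--         if lista_temperaturas[i] < 0:
--             j = i
--             while j < n and lista_temperaturas[j] < 0:
--                 j += 1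
--             runs.append((j - i, i, j - 1))
--             i = j
--         else:
--             i += 1
--     # Phase 2: pick the first run of maximal length.
--     if not runs:
--         return 0, None, None
--     best = max(runs, key=lambda r: r[0])
--     return best
-- ===== Notes on version B (the rewrite author's own statement) =====
-- stated objective: alternative
-- what changed: Replaced the online best-so-far while-loop (with its post-loop flush and tie handling in the running state) by a two-phase computation: first collect every maximal negative run as a (length,start,end) triple via an inner run-consuming loop, then select the first run of maximal length with max(key=len).
import Mathlib
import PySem

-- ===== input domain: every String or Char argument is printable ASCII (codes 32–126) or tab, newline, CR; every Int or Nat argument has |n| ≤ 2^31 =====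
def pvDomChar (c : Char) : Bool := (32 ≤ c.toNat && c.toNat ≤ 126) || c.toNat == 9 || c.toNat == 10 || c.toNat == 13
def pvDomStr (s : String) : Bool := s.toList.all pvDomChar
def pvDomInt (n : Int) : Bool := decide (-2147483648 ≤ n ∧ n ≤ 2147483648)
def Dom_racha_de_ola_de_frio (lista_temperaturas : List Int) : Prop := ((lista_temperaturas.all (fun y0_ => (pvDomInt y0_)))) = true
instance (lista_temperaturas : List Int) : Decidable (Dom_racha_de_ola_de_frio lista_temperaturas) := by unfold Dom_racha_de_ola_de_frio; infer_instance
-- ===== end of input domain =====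

-- B replaces A's online best-so-far scan by a two-phase build-all-negative-runs-then-select-first-max computation (objective: alternative; same cost).


-- ===== PORT A =====
-- the while loop, element by element; state = (inicio, longitud, mayor_inicio, mayor_longitud, mayor_final);
-- returns the final (i, inicio, longitud, mayor_inicio, mayor_longitud, mayor_final)
def pvALoop : List Int → Int → Int → Int → Int → Int → Int →
    Int × Int × Int × Int × Int × Int
  | [], i, inicio, longitud, mi, ml, mf => (i, inicio, longitud, mi, ml, mf)
  | t :: ts, i, inicio, longitud, mi, ml, mf =>
    if t < 0 then
      pvALoop ts (i + 1) (if longitud = 0 then i else inicio) (longitud + 1) mi ml mf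
    else
      if longitud > ml then
        pvALoop ts (i + 1) inicio 0 inicio longitud (i - 1)
      else
        pvALoop ts (i + 1) inicio 0 mi ml mf

def racha_de_ola_de_frio (lista_temperaturas : List Int) : Int × Option Int × Option Int :=
  let st := pvALoop lista_temperaturas 0 (-1) 0 (-1) 0 (-1)
  let i := st.1; let inicio := st.2.1; let longitud := st.2.2.1
  let mi := st.2.2.2.1; let ml := st.2.2.2.2.1; let mf := st.2.2.2.2.2
  let best : Int × Int × Int := if longitud > ml then (longitud, inicio, i - 1) else (ml, mi, mf)
  if best.1 = 0 then (0, none, none) else (best.1, some best.2.1, some best.2.2)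

-- ===== PORT B =====
-- phase 1 of Source B: collect every maximal run of negatives as (length, start, end)
def pvRunsB : List Int → Int → List (Int × Int × Int)
  | [], _ => []
  | t :: ts, i =>
    if t < 0 then
      let n : Int := (ts.takeWhile (fun x => decide (x < 0))).length + 1
      (n, i, i + n - 1) :: pvRunsB (ts.dropWhile (fun x => decide (x < 0))) (i + n)
    else
      pvRunsB ts (i + 1)
  termination_by l => l.length
  decreasing_by
  · simpa using Nat.lt_succ_of_le (List.length_dropWhile_le _ _)
  · simp

def racha_de_ola_de_frio_alt (lista_temperaturas : List Int) : Int × Option Int × Option Int :=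
  -- phase 2 of Source B: max(runs, key=lambda r: r[0]), empty runs -> (0, None, None)
  match PySem.List.max? (pvRunsB lista_temperaturas 0) (fun r => r.1) with
  | none => (0, none, none)
  | some best => (best.1, some best.2.1, some best.2.2)

-- ===== PRECONDITION & SPEC =====
def Spec_racha_de_ola_de_frio (lista_temperaturas : List Int) (out : Int × Option Int × Option Int) : Prop := out = racha_de_ola_de_frio_alt lista_temperaturas
instance (lista_temperaturas : List Int) (out : Int × Option Int × Option Int) : Decidable (Spec_racha_de_ola_de_frio lista_temperaturas out) := by unfold Spec_racha_de_ola_de_frio; infer_instance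

-- ===== CLAIM (what is proved, stated in full; the proofs are below) =====
def Claim_equal_racha_de_ola_de_frio : Prop := ∀ (lista_temperaturas : List Int), Dom_racha_de_ola_de_frio lista_temperaturas → Spec_racha_de_ola_de_frio lista_temperaturas (racha_de_ola_de_frio lista_temperaturas)

-- ===== LEMMAS AND PROOFS =====

-- pick the first triple of maximal first component (what the foldl inside max? does after the first element)
def pvPick (b r : Int × Int × Int) : Int × Int × Int := if r.1 > b.1 then r else b

-- A's tail: flush the open run, then turn the best triple into the result
def pvPost (st : Int × Int × Int × Int × Int × Int) : Int × Option Int × Option Int :=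
  let i := st.1; let inicio := st.2.1; let longitud := st.2.2.1
  let mi := st.2.2.2.1; let ml := st.2.2.2.2.1; let mf := st.2.2.2.2.2
  let best : Int × Int × Int := if longitud > ml then (longitud, inicio, i - 1) else (ml, mi, mf)
  if best.1 = 0 then (0, none, none) else (best.1, some best.2.1, some best.2.2)

def pvOut (b : Int × Int × Int) : Int × Option Int × Option Int :=
  if b.1 = 0 then (0, none, none) else (b.1, some b.2.1, some b.2.2)

theorem pvALoop_negblock (neg : List Int) :
    ∀ (rest : List Int) (i inicio L mi ml mf : Int), (∀ x ∈ neg, x < 0) → 0 < L →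
    pvALoop (neg ++ rest) i inicio L mi ml mf
      = pvALoop rest (i + neg.length) inicio (L + neg.length) mi ml mf := by
  induction neg with
  | nil => intro rest i inicio L mi ml mf _ _; simp
  | cons t ts ih =>
    intro rest i inicio L mi ml mf hneg hL
    have ht : t < 0 := hneg t (by simp)
    have hts : ∀ x ∈ ts, x < 0 := fun x hx => hneg x (by simp [hx])
    simp only [List.cons_append, pvALoop, if_pos ht, if_neg (show ¬ L = 0 by omega)]
    rw [ih rest (i + 1) inicio (L + 1) mi ml mf hts (by omega)]
    have e1 : i + 1 + (ts.length : Int) = i + ((t :: ts).length : Int) := by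
      push_cast [List.length_cons]; ring
    have e2 : L + 1 + (ts.length : Int) = L + ((t :: ts).length : Int) := by
      push_cast [List.length_cons]; ring
    rw [e1, e2]

-- every run collected by B has positive length
theorem pvRunsB_pos : ∀ (N : ℕ) (l : List Int), l.length ≤ N →
    ∀ (i : Int), ∀ r ∈ pvRunsB l i, 0 < r.1 := by
  intro N
  induction N with
  | zero =>
    intro l hl i r hr
    have : l = [] := List.eq_nil_of_length_eq_zero (Nat.le_zero.mp hl)
    subst this; simp [pvRunsB] at hr
  | succ N ih =>
    intro l hl i r hr
    match l with
    | [] => simp [pvRunsB] at hr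
    | t :: ts =>
      by_cases ht : t < 0
      · simp only [pvRunsB, if_pos ht, List.mem_cons] at hr
        rcases hr with h | h
        · subst h; simp
        · have hlen : (ts.dropWhile (fun x => decide (x < 0))).length ≤ N := by
            have := List.length_dropWhile_le (fun x => decide (x < 0)) ts
            simp at hl; omega
          exact ih _ hlen _ r h
      · simp only [pvRunsB, if_neg ht] at hr
        have hlen : ts.length ≤ N := by simp at hl; omega
        exact ih _ hlen _ r hr

-- the main invariant: from a closed-run state (longitud = 0), A's remaining computation
-- is the fold of pvPick over B's runs of the remaining list, started at the best so far
theorem pvMain : ∀ (N : ℕ) (l : List Int), l.length ≤ N →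
    ∀ (i inicio mi ml mf : Int), 0 ≤ ml →
    pvPost (pvALoop l i inicio 0 mi ml mf)
      = pvOut (List.foldl pvPick (ml, mi, mf) (pvRunsB l i)) := by
  intro N
  induction N with
  | zero =>
    intro l hl i inicio mi ml mf hml
    have : l = [] := List.eq_nil_of_length_eq_zero (Nat.le_zero.mp hl)
    subst this
    simp only [pvALoop, pvRunsB, List.foldl_nil, pvPost, pvOut]
    simp only [show ¬((0:Int) > ml) by omega, if_false]
  | succ N ih =>
    intro l hl i inicio mi ml mf hml
    match l with
    | [] =>
      simp only [pvALoop, pvRunsB, List.foldl_nil, pvPost, pvOut]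
      simp only [show ¬((0:Int) > ml) by omega, if_false]
    | t :: ts =>
      by_cases ht : t < 0
      · -- a negative run of length n = 1 + |takeWhile (<0) ts| starts at i
        set neg := ts.takeWhile (fun x => decide (x < 0)) with hneg
        set rest := ts.dropWhile (fun x => decide (x < 0)) with hrest
        have hsplit : ts = neg ++ rest := (List.takeWhile_append_dropWhile).symm
        have hnegall : ∀ x ∈ neg, x < 0 := by
          intro x hx
          have := List.mem_takeWhile_imp hx
          simpa using this
        have hrestlen : rest.length ≤ ts.length := List.length_dropWhile_le _ _
        set n : Int := (neg.length : Int) + 1 with hn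
        have hrun : pvRunsB (t :: ts) i = (n, i, i + n - 1) :: pvRunsB rest (i + n) := by
          simp only [pvRunsB, if_pos ht]
          congr 1
        have hstep : pvALoop (t :: ts) i inicio 0 mi ml mf
            = pvALoop rest (i + n) i n mi ml mf := by
          have h1 : pvALoop (t :: ts) i inicio 0 mi ml mf
              = pvALoop ts (i + 1) i 1 mi ml mf := by
            simp only [pvALoop, if_pos ht, if_true, Int.zero_add]
          rw [h1]
          conv_lhs => rw [hsplit]
          rw [pvALoop_negblock neg rest (i+1) i 1 mi ml mf hnegall (by omega)]
          have e1 : i + 1 + (neg.length : Int) = i + n := by omega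
          have e2 : (1:Int) + (neg.length : Int) = n := by omega
          rw [e1, e2]
        rw [hstep, hrun]
        have hbest : List.foldl pvPick (ml, mi, mf) ((n, i, i + n - 1) :: pvRunsB rest (i + n))
            = List.foldl pvPick (pvPick (ml, mi, mf) (n, i, i + n - 1)) (pvRunsB rest (i + n)) := by
          simp
        rw [hbest]
        by_cases hgt : n > ml
        · -- the run beats the best so far
          match rest, hrest with
          | [], hr =>
            simp only [pvALoop, pvRunsB, List.foldl_nil, pvPost, pvOut, pvPick, if_pos hgt]
          | r :: rs, hr =>
            have hrneg : ¬ r < 0 := by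
              have h := List.head?_dropWhile_not (p := fun x => decide (x < 0)) (l := ts)
              rw [← hr] at h
              simp at h
              omega
            have h1 : pvALoop (r :: rs) (i + n) i n mi ml mf
                = pvALoop rs (i + n + 1) i 0 i n (i + n - 1) := by
              simp only [pvALoop, if_neg hrneg, if_pos hgt]
            have h2 : pvALoop (r :: rs) (i + n) i 0 i n (i + n - 1)
                = pvALoop rs (i + n + 1) i 0 i n (i + n - 1) := by
              have : ¬ ((0:Int) > n) := by omega
              simp only [pvALoop, if_neg hrneg, if_neg this]
            rw [h1, ← h2]
            have hlen : (r :: rs).length ≤ N := by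
              have : ts.length ≤ N := by simpa using Nat.lt_succ_iff.mp (Nat.lt_of_lt_of_le (by simp) hl)
              omega
            rw [ih (r :: rs) hlen (i + n) i i n (i + n - 1) (by omega)]
            congr 2
            simp only [pvPick]
            rw [if_pos hgt]
        · -- the best so far survives
          have hpick : pvPick (ml, mi, mf) (n, i, i + n - 1) = (ml, mi, mf) := by
            simp only [pvPick]; rw [if_neg hgt]
          rw [hpick]
          match rest, hrest with
          | [], hr =>
            simp only [pvALoop, pvRunsB, List.foldl_nil, pvPost, pvOut]
            simp only [if_neg hgt]
          | r :: rs, hr =>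
            have hrneg : ¬ r < 0 := by
              have h := List.head?_dropWhile_not (p := fun x => decide (x < 0)) (l := ts)
              rw [← hr] at h
              simp at h
              omega
            have h1 : pvALoop (r :: rs) (i + n) i n mi ml mf
                = pvALoop rs (i + n + 1) i 0 mi ml mf := by
              simp only [pvALoop, if_neg hrneg, if_neg hgt]
            have h2 : pvALoop (r :: rs) (i + n) i 0 mi ml mf
                = pvALoop rs (i + n + 1) i 0 mi ml mf := by
              have : ¬ ((0:Int) > ml) := by omega
              simp only [pvALoop, if_neg hrneg, if_neg this]
            rw [h1, ← h2]
            have hlen : (r :: rs).length ≤ N := by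
              have : ts.length ≤ N := by simpa using Nat.lt_succ_iff.mp (Nat.lt_of_lt_of_le (by simp) hl)
              omega
            exact ih (r :: rs) hlen (i + n) i mi ml mf hml
      · -- nonnegative element, run stays closed
        have h0 : ¬ ((0:Int) > ml) := by omega
        simp only [pvALoop, if_neg ht, if_neg h0, pvRunsB]
        exact ih ts (Nat.lt_succ_iff.mp (Nat.lt_of_lt_of_le (by simp) hl)) (i + 1) inicio mi ml mf hml

-- max? over a nonempty list is the pvPick fold started at the head
theorem pvMaxCons (rt : List (Int × Int × Int)) : ∀ (b : Int × Int × Int),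
    PySem.List.max? (b :: rt) (fun r => r.1) = some (List.foldl pvPick b rt) := by
  induction rt with
  | nil => intro b; simp [PySem.List.max?]
  | cons r rs ih =>
    intro b
    have hstep : PySem.List.max? (b :: r :: rs) (fun r => r.1)
        = PySem.List.max? (pvPick b r :: rs) (fun r => r.1) := by
      simp only [PySem.List.max?, List.foldl_cons]
      congr 1
      by_cases h : b.1 < r.1
      · simp [pvPick, h]
      · simp [pvPick, h]
    rw [hstep, ih (pvPick b r)]
    simp

-- ===== VERDICT (by name: the statement is the Claim_ definition above) =====
theorem racha_de_ola_de_frio_spec : Claim_equal_racha_de_ola_de_frio := by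
  intro l _
  unfold Spec_racha_de_ola_de_frio
  have hA : racha_de_ola_de_frio l = pvPost (pvALoop l 0 (-1) 0 (-1) 0 (-1)) := rfl
  rw [hA, pvMain l.length l le_rfl 0 (-1) (-1) 0 (-1) le_rfl]
  unfold racha_de_ola_de_frio_alt
  match hruns : pvRunsB l 0 with
  | [] => simp [pvOut, PySem.List.max?]
  | r :: rs =>
    have hrpos : 0 < r.1 := pvRunsB_pos l.length l le_rfl 0 r (by rw [hruns]; simp)
    have hfirst : pvPick ((0:Int), (-1:Int), (-1:Int)) r = r := by
      simp only [pvPick]; rw [if_pos (by exact hrpos)]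
    simp only [List.foldl_cons, hfirst]
    rw [pvMaxCons rs r]
    have hpos : 0 < (List.foldl pvPick r rs).1 := by
      clear hruns hfirst
      induction rs generalizing r with
      | nil => simpa using hrpos
      | cons x xs ihx =>
        simp only [List.foldl_cons]
        apply ihx
        simp only [pvPick]
        split <;> omega
    simp only [pvOut]
    rw [if_neg (by omega)]
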